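-- pv_equiv track=rewrite | github.com/tu95ctv/ocom_ref | bds/models/compute_choosed_area.py | muc_don_gia_
-- ===== SOURCE A (Python) =====
-- def muc_don_gia_(don_gia):
--     muc_dt_list =[('0','0'),('0-30','0-30'),('30-60','30-60'),('60-90','60-90'),
--                                 ('90-120','90-120'),('120-150','120-150'),('150-180','150-180'),('180-210','180-210'),('>210','>210')]
--     selection = None
--     for muc_gia_can_tren in range(0,8):
--         if don_gia <= muc_gia_can_tren*30:
--             selection = muc_dt_list[muc_gia_can_tren][0]
--             break
--     if not selection:
--         selection = muc_dt_list[-1][0]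
--     return selection
-- ===== SOURCE B (Python) =====
-- def muc_don_gia_(don_gia):
--     labels = ['0', '0-30', '30-60', '60-90', '90-120', '120-150', '150-180', '180-210', '>210']
--     idx = -(-don_gia // 30)          # ceiling division
--     if idx < 0:
--         idx = 0
--     elif idx > 8:
--         idx = 8
--     return labels[idx]
-- ===== Notes on version B (the rewrite author's own statement) =====
-- stated objective: simpler
-- what changed: Replaced the linear threshold scan with sentinel fallback by a closed-form clamped ceiling-division index into a flat label list.
import Mathlib
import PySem

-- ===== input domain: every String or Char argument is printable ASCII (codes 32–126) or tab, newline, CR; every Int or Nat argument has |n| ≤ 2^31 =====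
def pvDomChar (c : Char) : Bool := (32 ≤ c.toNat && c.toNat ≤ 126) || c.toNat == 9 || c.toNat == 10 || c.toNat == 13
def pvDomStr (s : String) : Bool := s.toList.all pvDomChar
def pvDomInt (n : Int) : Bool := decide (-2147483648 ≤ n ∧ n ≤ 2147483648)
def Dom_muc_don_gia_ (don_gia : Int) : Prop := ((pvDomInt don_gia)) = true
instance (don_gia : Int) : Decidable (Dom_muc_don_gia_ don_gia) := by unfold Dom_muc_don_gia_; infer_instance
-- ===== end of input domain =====

-- B replaces A's linear threshold scan with a closed-form clamped ceiling-division index into a flat label list (simpler).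

-- ===== PORT A =====
def pvMucList : List (String × String) :=
  [("0","0"),("0-30","0-30"),("30-60","30-60"),("60-90","60-90"),
   ("90-120","90-120"),("120-150","120-150"),("150-180","150-180"),("180-210","180-210"),(">210",">210")]

-- the 'for muc_gia_can_tren in range(0,8): if …: selection = …; break' loop
def mucLoopA (don_gia : Int) : List Int → Option String
  | [] => none
  | k :: rest =>
    if don_gia ≤ k * 30 then (PySem.List.pyGet? pvMucList k).map Prod.fst
    else mucLoopA don_gia rest

def muc_don_gia_ (don_gia : Int) : String :=
  let selection := mucLoopA don_gia (PySem.List.pyRange 0 8 1)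
  -- 'if not selection': None or the empty string fall through to muc_dt_list[-1][0]
  match selection with
  | some s => if s = "" then ((PySem.List.pyGet? pvMucList (-1)).map Prod.fst).getD "" else s
  | none => ((PySem.List.pyGet? pvMucList (-1)).map Prod.fst).getD ""

-- ===== PORT B =====
def pvLabels : List String :=
  ["0", "0-30", "30-60", "60-90", "90-120", "120-150", "150-180", "180-210", ">210"]

def muc_don_gia__alt (don_gia : Int) : String :=
  let idx := -(PySem.Int.floordiv (-don_gia) 30)   -- ceiling division -(-x // 30)
  let idx := if idx < 0 then 0 else if idx > 8 then 8 else idx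
  ((PySem.List.pyGet? pvLabels idx).getD "")

-- ===== PRECONDITION & SPEC =====
def Spec_muc_don_gia_ (don_gia : Int) (out : String) : Prop := out = muc_don_gia__alt don_gia
instance (don_gia : Int) (out : String) : Decidable (Spec_muc_don_gia_ don_gia out) := by unfold Spec_muc_don_gia_; infer_instance

-- ===== CLAIM (what is proved, stated in full; the proofs are below) =====
def Claim_equal_muc_don_gia_ : Prop := ∀ (don_gia : Int), Dom_muc_don_gia_ don_gia → Spec_muc_don_gia_ don_gia (muc_don_gia_ don_gia)

-- ===== LEMMAS AND PROOFS =====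

theorem pvRange08 : PySem.List.pyRange 0 8 1 = [0,1,2,3,4,5,6,7] := by decide

-- B returns labels[k] exactly on the k-th bucket (k = 0: d ≤ 0; 1 ≤ k ≤ 7: (k-1)*30 < d ≤ k*30; k = 8: 210 < d)
theorem alt_bucket (d k : Int) (hk0 : 0 ≤ k) (hk8 : k ≤ 8)
    (hlo : (k = 0 ∧ d ≤ 0) ∨ ((k-1)*30 < d ∧ (k = 8 ∨ d ≤ k*30))) :
    muc_don_gia__alt d = (PySem.List.pyGet? pvLabels k).getD "" := by
  show (PySem.List.pyGet? pvLabels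
      (if -(PySem.Int.floordiv (-d) 30) < 0 then 0
       else if -(PySem.Int.floordiv (-d) 30) > 8 then 8
       else -(PySem.Int.floordiv (-d) 30))).getD "" = (PySem.List.pyGet? pvLabels k).getD ""
  rw [PySem.Int.floordiv_eq_ediv_of_pos (by omega)]
  have hk : (if -(-d/30) < 0 then (0:Int) else if -(-d/30) > 8 then 8 else -(-d/30)) = k := by
    split_ifs <;> omega
  rw [hk]

theorem muc_don_gia__spec : Claim_equal_muc_don_gia_ := by
  intro d _
  show muc_don_gia_ d = muc_don_gia__alt d
  unfold muc_don_gia_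
  rw [pvRange08]
  by_cases h0 : d ≤ 0
  · rw [alt_bucket d 0 (by omega) (by omega) (Or.inl ⟨rfl, h0⟩)]
    norm_num [mucLoopA, pvMucList, pvLabels, PySem.List.pyGet?, PySem.List.pyIdx?, h0] <;> decide
  · by_cases h1 : d ≤ 30
    · rw [alt_bucket d 1 (by omega) (by omega) (Or.inr ⟨by omega, Or.inr (by omega)⟩)]
      norm_num [mucLoopA, pvMucList, pvLabels, PySem.List.pyGet?, PySem.List.pyIdx?, h0, h1] <;> decide
    · by_cases h2 : d ≤ 60
      · rw [alt_bucket d 2 (by omega) (by omega) (Or.inr ⟨by omega, Or.inr (by omega)⟩)]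
        norm_num [mucLoopA, pvMucList, pvLabels, PySem.List.pyGet?, PySem.List.pyIdx?, h0, h1, h2] <;> decide
      · by_cases h3 : d ≤ 90
        · rw [alt_bucket d 3 (by omega) (by omega) (Or.inr ⟨by omega, Or.inr (by omega)⟩)]
          norm_num [mucLoopA, pvMucList, pvLabels, PySem.List.pyGet?, PySem.List.pyIdx?, h0, h1, h2, h3] <;> decide
        · by_cases h4 : d ≤ 120
          · rw [alt_bucket d 4 (by omega) (by omega) (Or.inr ⟨by omega, Or.inr (by omega)⟩)]
            norm_num [mucLoopA, pvMucList, pvLabels, PySem.List.pyGet?, PySem.List.pyIdx?, h0, h1, h2, h3, h4] <;> decide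
          · by_cases h5 : d ≤ 150
            · rw [alt_bucket d 5 (by omega) (by omega) (Or.inr ⟨by omega, Or.inr (by omega)⟩)]
              norm_num [mucLoopA, pvMucList, pvLabels, PySem.List.pyGet?, PySem.List.pyIdx?, h0, h1, h2, h3, h4, h5] <;> decide
            · by_cases h6 : d ≤ 180
              · rw [alt_bucket d 6 (by omega) (by omega) (Or.inr ⟨by omega, Or.inr (by omega)⟩)]
                norm_num [mucLoopA, pvMucList, pvLabels, PySem.List.pyGet?, PySem.List.pyIdx?, h0, h1, h2, h3, h4, h5, h6] <;> decide
              · by_cases h7 : d ≤ 210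
                · rw [alt_bucket d 7 (by omega) (by omega) (Or.inr ⟨by omega, Or.inr (by omega)⟩)]
                  norm_num [mucLoopA, pvMucList, pvLabels, PySem.List.pyGet?, PySem.List.pyIdx?, h0, h1, h2, h3, h4, h5, h6, h7] <;> decide
                · rw [alt_bucket d 8 (by omega) (by omega) (Or.inr ⟨by omega, Or.inl rfl⟩)]
                  norm_num [mucLoopA, pvMucList, pvLabels, PySem.List.pyGet?, PySem.List.pyIdx?, h0, h1, h2, h3, h4, h5, h6, h7] <;> decide
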